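-- pv_equiv track=rewrite | github.com/benquick123/code-profiling | code/batch-2/vse-naloge-brez-testov/DN7-M-098.py | brez_sosedov
-- ===== SOURCE A (Python) =====
-- def sosedov(x, y, mine):
--     """
--     Vrni število sosedov polja s koordinatami `(x, y)` na katerih je mina.
--     Polje samo ne šteje.
--
--     Args:
--         x (int): koordinata x
--         y (int): koordinata y
--         mine (set of tuple of int): koordinate min
--
--     Returns:
--         int: število sosedov
--     """
--     isky = y - 1
--     stmin = 0
--     while isky <= y + 1:
--         iskx = x - 1
--         while iskx <= x + 1:
--             if (iskx, isky) in mine: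
--                 stmin += 1
--             iskx += 1
--         isky += 1
--     if (x, y) in mine:
--         stmin -= 1
--     return stmin
--
-- def brez_sosedov(mine, s, v):
--     """
--     Vrni množico koordinat polj brez min na sosednjih poljih. Polje samo lahko
--     vsebuje mino.
--
--     Args:
--         mine (set of tuple of int): koordinate min
--         s (int): širina polja
--         v (int): višina polja
--
--     Returns:
--         set of tuple: polja brez min na sosednjih poljih
--     """
--     y = 0
--     mnozica = set()
--     while y <= v - 1:
--         x = 0
--         while x <= s - 1:
--             if sosedov(x, y, mine) == 0:
--                 mnozica.add((x, y))
--             x += 1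
--         y += 1
--     return mnozica
-- ===== SOURCE B (Python) =====
-- OFFS = ((-1, -1), (0, -1), (1, -1), (-1, 0), (1, 0), (-1, 1), (0, 1), (1, 1))
--
-- def brez_sosedov(mine, s, v):
--     # Mine-driven marking: mark every in-grid neighbor of a mine as forbidden,
--     # then return the complement of the forbidden set over the grid.
--     forbidden = set()
--     for (mx, my) in mine:
--         for (dx, dy) in OFFS:
--             nx, ny = mx + dx, my + dy
--             if 0 <= nx < s and 0 <= ny < v:
--                 forbidden.add((nx, ny))
--     return {(x, y) for y in range(v) for x in range(s) if (x, y) not in forbidden}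
-- ===== Notes on version B (the rewrite author's own statement) =====
-- stated objective: alternative
-- what changed: Replaces the per-cell 9-neighbor counting scan (helper sosedov run for every grid cell) with mine-driven marking: each mine marks its in-grid neighbors into a forbidden set once, and the result is the grid complement of that set.
import Mathlib
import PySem

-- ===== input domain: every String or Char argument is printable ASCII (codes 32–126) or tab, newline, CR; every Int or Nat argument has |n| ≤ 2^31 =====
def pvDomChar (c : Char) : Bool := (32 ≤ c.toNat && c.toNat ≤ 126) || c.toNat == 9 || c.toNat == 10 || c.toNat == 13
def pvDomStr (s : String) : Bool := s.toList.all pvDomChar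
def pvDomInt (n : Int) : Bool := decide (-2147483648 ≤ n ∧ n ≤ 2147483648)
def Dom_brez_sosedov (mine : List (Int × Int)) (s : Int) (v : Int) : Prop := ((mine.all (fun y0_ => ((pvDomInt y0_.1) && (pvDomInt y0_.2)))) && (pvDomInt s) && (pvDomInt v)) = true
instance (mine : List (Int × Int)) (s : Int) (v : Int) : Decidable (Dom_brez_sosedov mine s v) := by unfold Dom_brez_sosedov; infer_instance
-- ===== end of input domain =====

-- B replaces A's per-cell 9-neighbor counting scan with mine-driven marking of a
-- forbidden set followed by a grid complement (alternative algorithm, same result).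

-- ===== PORT A =====
-- inner 'while iskx <= x + 1' loop of helper sosedov
def sosedovRow (mine : List (Int × Int)) (x isky : Int) (iskx stmin : Int) : Int :=
  if h : iskx ≤ x + 1 then
    sosedovRow mine x isky (iskx + 1)
      (if (iskx, isky) ∈ mine then stmin + 1 else stmin)
  else stmin
termination_by (x + 2 - iskx).toNat
decreasing_by omega

-- outer 'while isky <= y + 1' loop of helper sosedov
def sosedovCol (mine : List (Int × Int)) (x y : Int) (isky stmin : Int) : Int :=
  if h : isky ≤ y + 1 then
    sosedovCol mine x y (isky + 1) (sosedovRow mine x isky (x - 1) stmin)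
  else stmin
termination_by (y + 2 - isky).toNat
decreasing_by omega

def sosedov (x y : Int) (mine : List (Int × Int)) : Int :=
  let stmin := sosedovCol mine x y (y - 1) 0
  if (x, y) ∈ mine then stmin - 1 else stmin

-- inner 'while x <= s - 1' loop of brez_sosedov
def bsRow (mine : List (Int × Int)) (s y : Int) (x : Int)
    (mnozica : PySem.Set (Int × Int)) : PySem.Set (Int × Int) :=
  if h : x ≤ s - 1 then
    bsRow mine s y (x + 1)
      (if sosedov x y mine = 0 then PySem.Set.add mnozica (x, y) else mnozica)
  else mnozica
termination_by (s - x).toNat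
decreasing_by omega

-- outer 'while y <= v - 1' loop of brez_sosedov
def bsCol (mine : List (Int × Int)) (s v : Int) (y : Int)
    (mnozica : PySem.Set (Int × Int)) : PySem.Set (Int × Int) :=
  if h : y ≤ v - 1 then
    bsCol mine s v (y + 1) (bsRow mine s y 0 mnozica)
  else mnozica
termination_by (v - y).toNat
decreasing_by omega

def brez_sosedov (mine : List (Int × Int)) (s : Int) (v : Int) : List (Int × Int) :=
  bsCol mine s v 0 PySem.Set.empty

-- ===== PORT B =====
-- the 8 neighbor offsets (OFFS in Source B)
def offs : List (Int × Int) :=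
  [(-1, -1), (0, -1), (1, -1), (-1, 0), (1, 0), (-1, 1), (0, 1), (1, 1)]

def brez_sosedov_alt (mine : List (Int × Int)) (s : Int) (v : Int) : List (Int × Int) :=
  let forbidden : PySem.Set (Int × Int) :=
    mine.foldl (fun f m =>
      offs.foldl (fun f d =>
        if 0 ≤ m.1 + d.1 ∧ m.1 + d.1 < s ∧ 0 ≤ m.2 + d.2 ∧ m.2 + d.2 < v then
          PySem.Set.add f (m.1 + d.1, m.2 + d.2)
        else f) f) PySem.Set.empty
  PySem.Set.ofList
    ((PySem.List.pyRange 0 v 1).flatMap (fun y =>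
      ((PySem.List.pyRange 0 s 1).filter (fun x => (x, y) ∉ forbidden)).map (fun x => (x, y))))

-- ===== PRECONDITION & SPEC =====
def Spec_brez_sosedov (mine : List (Int × Int)) (s : Int) (v : Int) (out : List (Int × Int)) : Prop := out = brez_sosedov_alt mine s v
instance (mine : List (Int × Int)) (s : Int) (v : Int) (out : List (Int × Int)) : Decidable (Spec_brez_sosedov mine s v out) := by unfold Spec_brez_sosedov; infer_instance

-- ===== CLAIM (what is proved, stated in full; the proofs are below) =====
def Claim_equal_brez_sosedov : Prop := ∀ (mine : List (Int × Int)) (s : Int) (v : Int), Dom_brez_sosedov mine s v → Spec_brez_sosedov mine s v (brez_sosedov mine s v)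

-- ===== LEMMAS AND PROOFS =====

-- 0/1 indicator
def ind (p : Prop) [Decidable p] : Int := if p then 1 else 0

lemma sosedovRow_eq (mine : List (Int × Int)) (x isky st : Int) :
    sosedovRow mine x isky (x - 1) st =
      st + ind ((x - 1, isky) ∈ mine) + ind ((x, isky) ∈ mine) + ind ((x + 1, isky) ∈ mine) := by
  rw [sosedovRow, dif_pos (by omega : x - 1 ≤ x + 1)]
  rw [sosedovRow, dif_pos (by omega : x - 1 + 1 ≤ x + 1)]
  rw [sosedovRow, dif_pos (by omega : x - 1 + 1 + 1 ≤ x + 1)]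
  rw [sosedovRow, dif_neg (by omega : ¬ x - 1 + 1 + 1 + 1 ≤ x + 1)]
  rw [show x - 1 + 1 = x from by omega]
  unfold ind
  split_ifs <;> omega

lemma sosedov_eq (x y : Int) (mine : List (Int × Int)) :
    sosedov x y mine =
      ind ((x - 1, y - 1) ∈ mine) + ind ((x, y - 1) ∈ mine) + ind ((x + 1, y - 1) ∈ mine) +
      ind ((x - 1, y) ∈ mine) + ind ((x + 1, y) ∈ mine) +
      ind ((x - 1, y + 1) ∈ mine) + ind ((x, y + 1) ∈ mine) + ind ((x + 1, y + 1) ∈ mine) := by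
  unfold sosedov
  dsimp only
  rw [sosedovCol, dif_pos (by omega : y - 1 ≤ y + 1)]
  rw [sosedovCol, dif_pos (by omega : y - 1 + 1 ≤ y + 1)]
  rw [sosedovCol, dif_pos (by omega : y - 1 + 1 + 1 ≤ y + 1)]
  rw [sosedovCol, dif_neg (by omega : ¬ y - 1 + 1 + 1 + 1 ≤ y + 1)]
  rw [show y - 1 + 1 = y from by omega]
  rw [sosedovRow_eq, sosedovRow_eq, sosedovRow_eq]
  unfold ind
  split_ifs <;> omega

-- the cell-keeping predicate both programs decide: no mine on any of the 8 neighbors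
abbrev keep (mine : List (Int × Int)) (x y : Int) : Prop :=
  ¬ ((x - 1, y - 1) ∈ mine ∨ (x, y - 1) ∈ mine ∨ (x + 1, y - 1) ∈ mine ∨
     (x - 1, y) ∈ mine ∨ (x + 1, y) ∈ mine ∨
     (x - 1, y + 1) ∈ mine ∨ (x, y + 1) ∈ mine ∨ (x + 1, y + 1) ∈ mine)

lemma sosedov_zero_iff (x y : Int) (mine : List (Int × Int)) :
    sosedov x y mine = 0 ↔ keep mine x y := by
  rw [sosedov_eq]
  unfold keep ind
  split_ifs <;> simp_all

-- membership in a conditional-add fold (B's forbidden-set building block)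
lemma mem_condAddFold {α : Type} (l : List α) (C : α → Prop) [DecidablePred C]
    (g : α → Int × Int) (f0 : PySem.Set (Int × Int)) (p : Int × Int) :
    p ∈ l.foldl (fun f a => if C a then PySem.Set.add f (g a) else f) f0 ↔
      p ∈ f0 ∨ ∃ a ∈ l, C a ∧ p = g a := by
  induction l generalizing f0 with
  | nil => simp
  | cons a l ih =>
    simp only [List.foldl_cons, ih, List.mem_cons]
    by_cases h : C a
    · simp only [if_pos h, PySem.Set.mem_add, exists_eq_or_imp]
      tauto
    · simp only [if_neg h, exists_eq_or_imp]
      tauto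

lemma mem_outer (mine : List (Int × Int)) (s v : Int) (f0 : PySem.Set (Int × Int)) (p : Int × Int) :
    p ∈ mine.foldl (fun f m =>
        offs.foldl (fun f d =>
          if 0 ≤ m.1 + d.1 ∧ m.1 + d.1 < s ∧ 0 ≤ m.2 + d.2 ∧ m.2 + d.2 < v then
            PySem.Set.add f (m.1 + d.1, m.2 + d.2)
          else f) f) f0 ↔
      p ∈ f0 ∨ ∃ m ∈ mine, ∃ d ∈ offs,
        (0 ≤ m.1 + d.1 ∧ m.1 + d.1 < s ∧ 0 ≤ m.2 + d.2 ∧ m.2 + d.2 < v) ∧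
        p = (m.1 + d.1, m.2 + d.2) := by
  induction mine generalizing f0 with
  | nil => simp
  | cons m l ih =>
    simp only [List.foldl_cons, ih, List.mem_cons]
    rw [mem_condAddFold offs
      (fun d => 0 ≤ m.1 + d.1 ∧ m.1 + d.1 < s ∧ 0 ≤ m.2 + d.2 ∧ m.2 + d.2 < v)
      (fun d => (m.1 + d.1, m.2 + d.2)) f0 p]
    simp only [exists_eq_or_imp]
    exact or_assoc

lemma ex_shift (mine : List (Int × Int)) (s v x y dx dy : Int)
    (hx : 0 ≤ x ∧ x < s) (hy : 0 ≤ y ∧ y < v) :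
    (∃ m ∈ mine, (0 ≤ m.1 + dx ∧ m.1 + dx < s ∧ 0 ≤ m.2 + dy ∧ m.2 + dy < v) ∧
      (x, y) = (m.1 + dx, m.2 + dy)) ↔ (x - dx, y - dy) ∈ mine := by
  constructor
  · rintro ⟨⟨a, b⟩, hm, _, heq⟩
    have h1 : x = a + dx := congrArg Prod.fst heq
    have h2 : y = b + dy := congrArg Prod.snd heq
    have : (x - dx, y - dy) = (a, b) := by rw [Prod.ext_iff]; exact ⟨by omega, by omega⟩
    rw [this]; exact hm
  · intro h
    exact ⟨(x - dx, y - dy), h, ⟨by omega, by omega, by omega, by omega⟩,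
      by rw [Prod.ext_iff]; exact ⟨by omega, by omega⟩⟩

lemma forbidden_iff (mine : List (Int × Int)) (s v x y : Int)
    (hx : 0 ≤ x ∧ x < s) (hy : 0 ≤ y ∧ y < v) :
    ((x, y) ∈ mine.foldl (fun f m =>
        offs.foldl (fun f d =>
          if 0 ≤ m.1 + d.1 ∧ m.1 + d.1 < s ∧ 0 ≤ m.2 + d.2 ∧ m.2 + d.2 < v then
            PySem.Set.add f (m.1 + d.1, m.2 + d.2)
          else f) f) PySem.Set.empty) ↔ ¬ keep mine x y := by
  rw [mem_outer]
  unfold keep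
  have hswap : ∀ P : (Int × Int) → (Int × Int) → Prop,
      (∃ m ∈ mine, ∃ d ∈ offs, P m d) ↔ (∃ d ∈ offs, ∃ m ∈ mine, P m d) := by
    intro P; constructor <;> rintro ⟨a, ha, b, hb, h⟩ <;> exact ⟨b, hb, a, ha, h⟩
  rw [show (∃ m ∈ mine, ∃ d ∈ offs,
        (0 ≤ m.1 + d.1 ∧ m.1 + d.1 < s ∧ 0 ≤ m.2 + d.2 ∧ m.2 + d.2 < v) ∧
        (x, y) = (m.1 + d.1, m.2 + d.2)) ↔ (∃ d ∈ offs, ∃ m ∈ mine,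
        (0 ≤ m.1 + d.1 ∧ m.1 + d.1 < s ∧ 0 ≤ m.2 + d.2 ∧ m.2 + d.2 < v) ∧
        (x, y) = (m.1 + d.1, m.2 + d.2)) from hswap _]
  simp only [offs, List.mem_cons, List.not_mem_nil, or_false, exists_eq_or_imp, exists_eq_left]
  rw [ex_shift mine s v x y (-1) (-1) hx hy, ex_shift mine s v x y 0 (-1) hx hy,
      ex_shift mine s v x y 1 (-1) hx hy, ex_shift mine s v x y (-1) 0 hx hy,
      ex_shift mine s v x y 1 0 hx hy, ex_shift mine s v x y (-1) 1 hx hy,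
      ex_shift mine s v x y 0 1 hx hy, ex_shift mine s v x y 1 1 hx hy]
  rw [not_not]
  simp only [PySem.Set.empty, List.not_mem_nil, false_or, sub_neg_eq_add, sub_zero]
  tauto

-- one row of the common result, from column x
def rowList (mine : List (Int × Int)) (s y x : Int) : List (Int × Int) :=
  ((PySem.List.pyRange x s 1).filter (fun xx => keep mine xx y)).map (fun xx => (xx, y))

-- rows y and onward
def gridList (mine : List (Int × Int)) (s v y : Int) : List (Int × Int) :=
  (PySem.List.pyRange y v 1).flatMap (fun yy => rowList mine s yy 0)

lemma bsRow_eq (mine : List (Int × Int)) (s y : Int) (x : Int)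
    (acc : PySem.Set (Int × Int)) (hacc : ∀ xx : Int, x ≤ xx → (xx, y) ∉ acc) :
    bsRow mine s y x acc = acc ++ rowList mine s y x := by
  induction hn : (s - x).toNat using Nat.strong_induction_on generalizing x acc with
  | _ n ih =>
  rw [bsRow]
  by_cases h : x ≤ s - 1
  · rw [dif_pos h]
    rw [ih ((s - (x+1)).toNat) (by omega) (x+1) _ ?_ rfl]
    · unfold rowList
      rw [PySem.List.pyRange_one_cons (by omega : x < s)]
      simp only [sosedov_zero_iff]
      by_cases hk : keep mine x y
      · rw [if_pos hk, PySem.Set.add_of_not_mem (hacc x le_rfl),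
          List.filter_cons_of_pos (by simpa using hk), List.map_cons]
        simp [List.append_assoc]
      · rw [if_neg hk, List.filter_cons_of_neg (by simpa using hk)]
    · intro xx hxx
      simp only [sosedov_zero_iff]
      by_cases hk : keep mine x y
      · rw [if_pos hk, PySem.Set.add_of_not_mem (hacc x le_rfl)]
        simp only [List.mem_append, List.mem_singleton]
        rintro (hmem | heq)
        · exact hacc xx (by omega) hmem
        · have : xx = x := congrArg Prod.fst heq
          omega
      · rw [if_neg hk]
        exact hacc xx (by omega)
  · rw [dif_neg h]
    unfold rowList
    rw [PySem.List.pyRange_one_eq_nil (by omega : s ≤ x)]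
    simp

lemma mem_rowList (mine : List (Int × Int)) (s y x : Int) (p : Int × Int) :
    p ∈ rowList mine s y x → p.2 = y := by
  unfold rowList
  intro h
  obtain ⟨xx, _, rfl⟩ := List.mem_map.mp h
  rfl

lemma bsCol_eq (mine : List (Int × Int)) (s v : Int) (y : Int)
    (acc : PySem.Set (Int × Int)) (hacc : ∀ xx yy : Int, y ≤ yy → (xx, yy) ∉ acc) :
    bsCol mine s v y acc = acc ++ gridList mine s v y := by
  induction hn : (v - y).toNat using Nat.strong_induction_on generalizing y acc with
  | _ n ih =>
  rw [bsCol]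
  by_cases h : y ≤ v - 1
  · rw [dif_pos h]
    rw [bsRow_eq mine s y 0 acc (fun xx _ => hacc xx y le_rfl)]
    rw [ih ((v - (y+1)).toNat) (by omega) (y+1) _ ?_ rfl]
    · unfold gridList
      rw [PySem.List.pyRange_one_cons (by omega : y < v)]
      simp [List.append_assoc]
    · intro xx yy hyy
      simp only [List.mem_append]
      rintro (hmem | hmem)
      · exact hacc xx yy (by omega) hmem
      · have := mem_rowList mine s y 0 (xx, yy) hmem
        simp at this; omega
  · rw [dif_neg h]
    unfold gridList
    rw [PySem.List.pyRange_one_eq_nil (by omega : v ≤ y)]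
    simp

lemma nodup_rowList (mine : List (Int × Int)) (s y x : Int) :
    (rowList mine s y x).Nodup := by
  unfold rowList
  refine List.Nodup.map ?_ (List.Nodup.filter _ (PySem.List.nodup_pyRange_one x s))
  intro a b hab
  exact congrArg Prod.fst hab

lemma nodup_gridList (mine : List (Int × Int)) (s v y : Int) :
    (gridList mine s v y).Nodup := by
  unfold gridList
  rw [List.nodup_flatMap]
  refine ⟨fun yy _ => nodup_rowList mine s yy 0, ?_⟩
  refine (PySem.List.pairwise_lt_pyRange_one y v).imp ?_
  intro a b hlt p hpa hpb
  have h1 := mem_rowList mine s a 0 p hpa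
  have h2 := mem_rowList mine s b 0 p hpb
  omega

-- ===== VERDICT (by name: the statement is the Claim_ definition above) =====
theorem brez_sosedov_spec : Claim_equal_brez_sosedov := by
  intro mine s v _
  unfold Spec_brez_sosedov brez_sosedov brez_sosedov_alt
  dsimp only
  rw [bsCol_eq mine s v 0 PySem.Set.empty (by intro xx yy _ h; simp [PySem.Set.empty] at h)]
  have hlist : gridList mine s v 0 =
      (PySem.List.pyRange 0 v 1).flatMap (fun y =>
        ((PySem.List.pyRange 0 s 1).filter (fun x => (x, y) ∉
          mine.foldl (fun f m =>
            offs.foldl (fun f d =>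
              if 0 ≤ m.1 + d.1 ∧ m.1 + d.1 < s ∧ 0 ≤ m.2 + d.2 ∧ m.2 + d.2 < v then
                PySem.Set.add f (m.1 + d.1, m.2 + d.2)
              else f) f) PySem.Set.empty)).map (fun x => (x, y))) := by
    unfold gridList rowList
    refine List.flatMap_congr ?_
    intro yy hyy
    have hyb := (PySem.List.mem_pyRange_one).mp hyy
    congr 1
    refine List.filter_congr ?_
    intro xx hxx
    have hxb := (PySem.List.mem_pyRange_one).mp hxx
    have := forbidden_iff mine s v xx yy ⟨hxb.1, hxb.2⟩ ⟨hyb.1, hyb.2⟩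
    simp only [this, not_not]
  rw [← hlist]
  exact (List.nil_append _).trans
    (PySem.Set.ofList_eq_self_of_nodup (gridList mine s v 0) (nodup_gridList mine s v 0)).symm
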